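-- pv_equiv track=rewrite | github.com/baloncek2662/advent-of-code-2024 | solutions/day_04.py | check_xmas_direction
-- ===== SOURCE A (Python) =====
-- def check_xmas_direction(matrix, i, j, x_dir, y_dir):
--     xmas = "XMAS"
--     letter_ix = 0
--     while i < len(matrix) and j < len(matrix) and i >= 0 and j >= 0:
--         if matrix[i][j] == xmas[letter_ix]:
--             letter_ix += 1
--             if letter_ix == len(xmas):
--                 return 1
--             i += y_dir
--             j += x_dir
--         else:
--             return 0
--     return 0
-- ===== SOURCE B (Python) =====
-- def check_xmas_direction(matrix, i, j, x_dir, y_dir):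
--     n = len(matrix)
--     cells = [(i + k * y_dir, j + k * x_dir) for k in range(4)]
--     if not all(0 <= r < n and 0 <= c < n for r, c in cells):
--         return 0
--     word = "".join(matrix[r][c] for r, c in cells)
--     return int(word == "XMAS")
-- ===== Notes on version B (the rewrite author's own statement) =====
-- stated objective: alternative
-- what changed: Replaces A's stateful while-loop (mutable position pointer, letter index, per-letter early exit) by a staged gather-then-compare: build the 4 cell positions by offset formula, bounds-check them all in one pass, extract the 4-character word, and return the result of a single whole-string comparison with "XMAS".
-- outside the precondition, e.g. on check_xmas_direction(['SA', 'XAA.', 'S.X', '.MA', 'S'], 0, 1, 1, 0): A returns 0, B raises IndexError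
import Mathlib
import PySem

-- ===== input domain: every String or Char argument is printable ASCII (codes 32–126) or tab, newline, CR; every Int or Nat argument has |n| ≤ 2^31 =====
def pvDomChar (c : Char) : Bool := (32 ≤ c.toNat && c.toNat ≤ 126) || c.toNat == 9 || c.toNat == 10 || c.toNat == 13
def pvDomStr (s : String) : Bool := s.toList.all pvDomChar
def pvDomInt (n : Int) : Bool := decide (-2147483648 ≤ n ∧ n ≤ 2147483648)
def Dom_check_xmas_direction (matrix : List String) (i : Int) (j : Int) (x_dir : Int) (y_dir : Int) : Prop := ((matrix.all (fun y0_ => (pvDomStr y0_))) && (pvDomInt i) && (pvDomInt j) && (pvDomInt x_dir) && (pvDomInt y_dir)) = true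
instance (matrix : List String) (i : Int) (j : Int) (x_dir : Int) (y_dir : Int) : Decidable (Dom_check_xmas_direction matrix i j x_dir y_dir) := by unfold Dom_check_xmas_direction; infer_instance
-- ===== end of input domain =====

-- B replaces A's stateful while loop by a staged gather-then-compare: compute the four cell
-- positions by the offset formula, bounds-check them all, extract the word, compare it to
-- "XMAS" once (objective: alternative). Equivalence of return values on Pre_.

-- ===== PORT A =====
-- A's while loop; the remaining suffix of "XMAS" stands for A's letter_ix (letters = "XMAS".drop letter_ix).
def pvLoopA (matrix : List String) (x_dir : Int) (y_dir : Int) : Int → Int → List Char → Int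
  | i, j, letters =>
    if i < (matrix.length : Int) ∧ j < (matrix.length : Int) ∧ 0 ≤ i ∧ 0 ≤ j then
      match letters with
      | [] => 0   -- unreachable: letter_ix never reaches len(xmas) inside the loop
      | c :: rest =>
        if ((PySem.List.pyGet? matrix i).bind (fun row => PySem.Str.pyGet? row j)) = some c then
          if rest = [] then 1
          else pvLoopA matrix x_dir y_dir (i + y_dir) (j + x_dir) rest
        else 0
    else 0

def check_xmas_direction (matrix : List String) (i : Int) (j : Int) (x_dir : Int) (y_dir : Int) : Int :=
  pvLoopA matrix x_dir y_dir i j ['X', 'M', 'A', 'S']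

-- ===== PORT B =====
-- B: cell positions by offset formula, one bounds pass over all of them, then one word
-- extraction and a single whole-word comparison (ragged rows inside the square bound would
-- raise in Python B; those inputs are outside Pre_, the extraction yields none there).
def check_xmas_direction_alt (matrix : List String) (i : Int) (j : Int) (x_dir : Int) (y_dir : Int) : Int :=
  let n : Int := matrix.length
  let cells := (List.range 4).map (fun k => (i + (k : Int) * y_dir, j + (k : Int) * x_dir))
  if cells.all (fun p => decide (0 ≤ p.1 ∧ p.1 < n ∧ 0 ≤ p.2 ∧ p.2 < n)) then
    let word := cells.map (fun p => (PySem.List.pyGet? matrix p.1).bind (fun row => PySem.Str.pyGet? row p.2))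
    if word = [some 'X', some 'M', some 'A', some 'S'] then 1 else 0
  else 0

-- ===== PRECONDITION & SPEC =====
-- Pre_ excludes ragged matrices on which one of the four cells along the direction lies inside
-- the square bound len(matrix) for both coordinates but at or beyond its own row's length:
-- there Python A can raise IndexError (and where A still returns 0 because of an earlier
-- mismatch, Python B raises while extracting the word).
def Pre_check_xmas_direction (matrix : List String) (i : Int) (j : Int) (x_dir : Int) (y_dir : Int) : Prop :=
  ∀ k ∈ ([0, 1, 2, 3] : List Int),
    0 ≤ i + k * y_dir → i + k * y_dir < (matrix.length : Int) →
    0 ≤ j + k * x_dir → j + k * x_dir < (matrix.length : Int) →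
    j + k * x_dir < ((matrix[(i + k * y_dir).toNat]?.getD "").length : Int)
instance (matrix : List String) (i : Int) (j : Int) (x_dir : Int) (y_dir : Int) : Decidable (Pre_check_xmas_direction matrix i j x_dir y_dir) := by unfold Pre_check_xmas_direction; infer_instance

def pvWitness_check_xmas_direction : List String × Int × Int × Int × Int := (["XM", "AS"], 0, 0, 1, 1)

def Spec_check_xmas_direction (matrix : List String) (i : Int) (j : Int) (x_dir : Int) (y_dir : Int) (out : Int) : Prop := out = check_xmas_direction_alt matrix i j x_dir y_dir
instance (matrix : List String) (i : Int) (j : Int) (x_dir : Int) (y_dir : Int) (out : Int) : Decidable (Spec_check_xmas_direction matrix i j x_dir y_dir out) := by unfold Spec_check_xmas_direction; infer_instance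

-- ===== CLAIM (what is proved, stated in full; the proofs are below) =====
def Claim_equal_check_xmas_direction : Prop := ∀ (matrix : List String) (i : Int) (j : Int) (x_dir : Int) (y_dir : Int), Dom_check_xmas_direction matrix i j x_dir y_dir → Pre_check_xmas_direction matrix i j x_dir y_dir → Spec_check_xmas_direction matrix i j x_dir y_dir (check_xmas_direction matrix i j x_dir y_dir)

-- ===== LEMMAS AND PROOFS =====
set_option maxHeartbeats 2000000 in
theorem pv_eq_all (matrix : List String) (i : Int) (j : Int) (x_dir : Int) (y_dir : Int) :
    check_xmas_direction matrix i j x_dir y_dir = check_xmas_direction_alt matrix i j x_dir y_dir := by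
  unfold check_xmas_direction check_xmas_direction_alt
  simp only [pvLoopA, List.range, List.range.loop]
  have e2 : i + (2 : Int) * y_dir = i + y_dir + y_dir := by ring
  have f2 : j + (2 : Int) * x_dir = j + x_dir + x_dir := by ring
  have e3 : i + (3 : Int) * y_dir = i + y_dir + y_dir + y_dir := by ring
  have f3 : j + (3 : Int) * x_dir = j + x_dir + x_dir + x_dir := by ring
  norm_num [e2, f2, e3, f3]
  split_ifs <;> simp_all <;> omega

-- ===== VERDICT (by name: the statement is the Claim_ definition above) =====
theorem check_xmas_direction_spec : Claim_equal_check_xmas_direction := by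
  intro matrix i j x_dir y_dir _ _
  unfold Spec_check_xmas_direction
  exact pv_eq_all matrix i j x_dir y_dir
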